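-- pv_equiv track=rewrite | github.com/PolicarpoBatistaUliana/UEC | ulianovramdompi.py | str_pi_4dig3
-- ===== SOURCE A (Python) =====
-- def str_pi_4dig3(str_pi_key, long_pi, num_digits, blk):
--     def validate_key(str_pi_key):
--         if str_pi_key[0] == '.' or str_pi_key[-1] == '.':
--             return False
--         if '..' in str_pi_key:
--             return False
--         parts = str_pi_key.split('.')
--         if len(parts) != 4:
--             return False
--         for part in parts:
--             if not part.isdigit() or int(part) < 0 or int(part) > 9999:
--                 return False
--         return True
--
--     if not validate_key(str_pi_key):
--         return None, False
--
--     inipi, jumppi1, jumppi2, jumppi3 = map(int, str_pi_key.split('.'))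
--     jumppi2 = 10 * jumppi2
--     if jumppi2 == jumppi3:
--         jumppi3 *= 2
--
--     result_str = ""
--     p = inipi * 1000 + jumppi1 + blk * num_digits
--     for _ in range(num_digits // 2):
--         result_str += long_pi[p % len(long_pi)]
--         p += jumppi2
--         result_str += long_pi[p % len(long_pi)]
--         p -= jumppi3
--
--     return result_str[:num_digits], True
-- ===== SOURCE B (Python) =====
-- def str_pi_4dig3(str_pi_key, long_pi, num_digits, blk):
--     parts = str_pi_key.split('.')
--     if len(parts) != 4 or any(not p.isdigit() or not 0 <= int(p) <= 9999 for p in parts):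
--         return None, False
--     inipi, jumppi1, jumppi2, jumppi3 = map(int, parts)
--     jumppi2 *= 10
--     if jumppi2 == jumppi3:
--         jumppi3 *= 2
--     step = jumppi2 - jumppi3
--     base = inipi * 1000 + jumppi1 + blk * num_digits
--     n = len(long_pi)
--     return ''.join(long_pi[(base + (k // 2) * step + (k % 2) * jumppi2) % n]
--                    for k in range(2 * (num_digits // 2))), True
-- ===== Notes on version B (the rewrite author's own statement) =====
-- stated objective: alternative
-- what changed: B validates the key purely by the shape of its split (exactly 4 all-digit parts with value <= 9999, which subsumes A's leading/trailing-dot and '..' checks), and replaces A's running-pointer loop (string += two chars per iteration, pointer walked up by jumppi2 and down by jumppi3) plus final [:num_digits] slice by a single flat per-output-position comprehension over range(2*(num_digits//2)) computing each character's index in closed form (base + (k//2)*step + (k%2)*jumppi2), with no maintained state and no truncation.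
import Mathlib
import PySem

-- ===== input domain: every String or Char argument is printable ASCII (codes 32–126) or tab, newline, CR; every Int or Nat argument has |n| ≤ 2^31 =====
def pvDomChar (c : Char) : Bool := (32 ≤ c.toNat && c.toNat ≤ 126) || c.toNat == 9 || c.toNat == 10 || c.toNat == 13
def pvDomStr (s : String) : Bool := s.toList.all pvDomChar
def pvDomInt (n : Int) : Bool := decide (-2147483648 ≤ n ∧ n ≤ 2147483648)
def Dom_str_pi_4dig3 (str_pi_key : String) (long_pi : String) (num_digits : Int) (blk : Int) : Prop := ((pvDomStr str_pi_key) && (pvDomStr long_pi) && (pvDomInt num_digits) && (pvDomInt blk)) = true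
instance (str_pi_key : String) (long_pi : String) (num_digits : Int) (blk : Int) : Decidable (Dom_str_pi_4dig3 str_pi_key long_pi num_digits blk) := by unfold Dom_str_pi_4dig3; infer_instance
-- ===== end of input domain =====

-- B drops A's early-return dot-check validator in favour of a split-shape check (4 all-digit parts ≤ 9999),
-- and replaces A's running-pointer two-chars-per-iteration loop plus final slice by one flat per-output-position
-- comprehension with a closed-form index (base + (k//2)*step + (k%2)*jumppi2); alternative decomposition, same cost.


-- shared helper: long_pi[p % len(long_pi)] as both sources write it; exact for long_pi ≠ ""
-- (0 ≤ p % len < len); long_pi = "" (ZeroDivisionError in both) is excluded by Pre_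
def pvIdx (L : List Char) (p : Int) : Char :=
  (PySem.List.pyGet? L (PySem.Int.mod p (L.length : Int))).getD ' '

-- ===== PORT A =====

-- validate_key; str_pi_key[0] / [-1] read with a default, exact for str_pi_key ≠ "" (the IndexError case is excluded by Pre_);
-- int(part) is only reached under the isdigit guard, so .getD 0 is exact there
def pvValidateA (cs : List Char) : Bool :=
  if ((PySem.List.pyGet? cs 0).getD ' ') == '.' || ((PySem.List.pyGet? cs (-1)).getD ' ') == '.' then false
  else if PySem.Chars.isIn ['.', '.'] cs then false
  else
    let parts := PySem.Chars.splitOn cs ['.']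
    if parts.length ≠ 4 then false
    else parts.all (fun part =>
      if !PySem.Chars.strIsdigit part then false
      else
        let v := (PySem.Int.ofChars? part).getD 0
        !(decide (v < 0) || decide (9999 < v)))

def str_pi_4dig3 (str_pi_key : String) (long_pi : String) (num_digits : Int) (blk : Int) : Option String × Bool :=
  let kc := str_pi_key.toList
  if !pvValidateA kc then (none, false)
  else
    let L := long_pi.toList
    let parts := PySem.Chars.splitOn kc ['.']
    let inipi := (PySem.Int.ofChars? (parts.getD 0 [])).getD 0
    let jumppi1 := (PySem.Int.ofChars? (parts.getD 1 [])).getD 0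
    let jumppi2 := 10 * (PySem.Int.ofChars? (parts.getD 2 [])).getD 0
    let jumppi3 := (PySem.Int.ofChars? (parts.getD 3 [])).getD 0
    let jumppi3 := if jumppi2 == jumppi3 then 2 * jumppi3 else jumppi3
    let p := inipi * 1000 + jumppi1 + blk * num_digits
    let st := (PySem.List.pyRange 0 (PySem.Int.floordiv num_digits 2) 1).foldl
        (fun (st : List Char × Int) _ =>
          let r := st.1 ++ [pvIdx L st.2]
          let p := st.2 + jumppi2
          let r := r ++ [pvIdx L p]
          (r, p - jumppi3)) ([], p)
    (some (String.ofList (PySem.List.slice st.1 none (some num_digits))), true)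

-- ===== PORT B =====
-- Source B's guard: len(parts) != 4 or any(not p.isdigit() or not 0 <= int(p) <= 9999 for p in parts)
def pvBadB (parts : List (List Char)) : Bool :=
  decide (parts.length ≠ 4) ||
  parts.any (fun p =>
    !PySem.Chars.strIsdigit p ||
    !(decide (0 ≤ (PySem.Int.ofChars? p).getD 0) && decide ((PySem.Int.ofChars? p).getD 0 ≤ 9999)))

def str_pi_4dig3_alt (str_pi_key : String) (long_pi : String) (num_digits : Int) (blk : Int) : Option String × Bool :=
  let parts := PySem.Chars.splitOn str_pi_key.toList ['.']
  if pvBadB parts then (none, false)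
  else
    let inipi := (PySem.Int.ofChars? (parts.getD 0 [])).getD 0
    let jumppi1 := (PySem.Int.ofChars? (parts.getD 1 [])).getD 0
    let jumppi2 := 10 * (PySem.Int.ofChars? (parts.getD 2 [])).getD 0
    let jumppi3 := (PySem.Int.ofChars? (parts.getD 3 [])).getD 0
    let jumppi3 := if jumppi2 == jumppi3 then 2 * jumppi3 else jumppi3
    let step := jumppi2 - jumppi3
    let base := inipi * 1000 + jumppi1 + blk * num_digits
    let L := long_pi.toList
    let body := (PySem.List.pyRange 0 (2 * PySem.Int.floordiv num_digits 2) 1).map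
        (fun k => pvIdx L (base + PySem.Int.floordiv k 2 * step + PySem.Int.mod k 2 * jumppi2))
    (some (String.ofList body), true)

-- ===== PRECONDITION & SPEC =====
-- key shape used only by Pre_ (a valid dotted key): 4 '.'-separated parts, each a digit run with value ≤ 9999
def pvKeyOk (cs : List Char) : Bool :=
  (PySem.Chars.splitOn cs ['.']).length == 4 &&
  (PySem.Chars.splitOn cs ['.']).all (fun p =>
    PySem.Chars.strIsdigit p && decide ((PySem.Int.ofChars? p).getD 0 ≤ 9999))

-- Pre_ excludes only inputs where A raises: an empty key (IndexError on str_pi_key[0]),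
-- and an empty long_pi together with a valid key and num_digits ≥ 2 (ZeroDivisionError on p % len(long_pi)).
def Pre_str_pi_4dig3 (str_pi_key : String) (long_pi : String) (num_digits : Int) (blk : Int) : Prop :=
  str_pi_key ≠ "" ∧ ((pvKeyOk str_pi_key.toList = true ∧ 2 ≤ num_digits) → long_pi ≠ "")
instance (str_pi_key : String) (long_pi : String) (num_digits : Int) (blk : Int) : Decidable (Pre_str_pi_4dig3 str_pi_key long_pi num_digits blk) := by unfold Pre_str_pi_4dig3; infer_instance

def pvWitness_str_pi_4dig3 : String × String × Int × Int := ("3.14.15.92", "31415926535897932384", 8, 1)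

def Spec_str_pi_4dig3 (str_pi_key : String) (long_pi : String) (num_digits : Int) (blk : Int) (out : Option String × Bool) : Prop := out = str_pi_4dig3_alt str_pi_key long_pi num_digits blk
instance (str_pi_key : String) (long_pi : String) (num_digits : Int) (blk : Int) (out : Option String × Bool) : Decidable (Spec_str_pi_4dig3 str_pi_key long_pi num_digits blk out) := by unfold Spec_str_pi_4dig3; infer_instance

-- ===== CLAIM (what is proved, stated in full; the proofs are below) =====
def Claim_equal_str_pi_4dig3 : Prop := ∀ (str_pi_key : String) (long_pi : String) (num_digits : Int) (blk : Int), Dom_str_pi_4dig3 str_pi_key long_pi num_digits blk → Pre_str_pi_4dig3 str_pi_key long_pi num_digits blk → Spec_str_pi_4dig3 str_pi_key long_pi num_digits blk (str_pi_4dig3 str_pi_key long_pi num_digits blk)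

-- ===== LEMMAS AND PROOFS =====

-- reference shape of str.split('.') used only by the proofs
def pvSplit : List Char → List (List Char)
  | [] => [[]]
  | c :: r =>
    if c = '.' then [] :: pvSplit r
    else
      match pvSplit r with
      | [] => [[c]]
      | p :: ps => (c :: p) :: ps

theorem pvSplit_cons_dot (r : List Char) : pvSplit ('.' :: r) = [] :: pvSplit r := by
  simp [pvSplit]

theorem pvSplit_cons_ne (c : Char) (r : List Char) (p : List Char) (ps : List (List Char))
    (hc : c ≠ '.') (hps : pvSplit r = p :: ps) : pvSplit (c :: r) = (c :: p) :: ps := by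
  simp [pvSplit, hc, hps]

theorem pvSplit_ne_nil (cs : List Char) : pvSplit cs ≠ [] := by
  cases cs with
  | nil => simp [pvSplit]
  | cons c r =>
    by_cases hc : c = '.'
    · subst hc; rw [pvSplit_cons_dot]; simp
    · cases hps : pvSplit r with
      | nil => simp [pvSplit, hc, hps]
      | cons p ps => rw [pvSplit_cons_ne c r p ps hc hps]; simp

theorem pvSplit_cons_ne_single_nil (d : Char) (r : List Char) : pvSplit (d :: r) ≠ [[]] := by
  by_cases hd : d = '.'
  · subst hd
    rw [pvSplit_cons_dot]
    intro h
    simp at h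
    exact pvSplit_ne_nil r h
  · cases hps : pvSplit r with
    | nil => exact absurd hps (pvSplit_ne_nil r)
    | cons p ps => rw [pvSplit_cons_ne d r p ps hd hps]; simp

theorem pvGo_spec : ∀ (fuel : Nat) (l cur : List Char) (acc : List (List Char)), l.length < fuel →
    PySem.Chars.splitOn.go ['.'] fuel l cur acc
      = acc.reverse ++ (pvSplit l).modifyHead (cur.reverse ++ ·) := by
  intro fuel
  induction fuel with
  | zero => intro l cur acc h; omega
  | succ n ih =>
    intro l cur acc h
    cases l with
    | nil => simp [PySem.Chars.splitOn.go, pvSplit]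
    | cons c r =>
      by_cases hc : c = '.'
      · subst hc
        have hpre : List.isPrefixOf ['.'] ('.' :: r) = true := by simp [List.isPrefixOf]
        rw [PySem.Chars.splitOn.go]
        simp only [hpre, if_true]
        have hdrop : List.drop ['.'].length ('.' :: r) = r := rfl
        rw [hdrop, ih r [] (cur.reverse :: acc) (by simp at h ⊢; omega)]
        rw [pvSplit_cons_dot]
        cases hps : pvSplit r with
        | nil => exact absurd hps (pvSplit_ne_nil r)
        | cons p ps => simp
      · have hpre : List.isPrefixOf ['.'] (c :: r) = false := by
          simp [List.isPrefixOf]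
          exact fun h => hc h.symm
        rw [PySem.Chars.splitOn.go]
        simp only [hpre, Bool.false_eq_true, if_false]
        rw [ih r (c :: cur) acc (by simp at h ⊢; omega)]
        cases hps : pvSplit r with
        | nil => exact absurd hps (pvSplit_ne_nil r)
        | cons p ps =>
          rw [pvSplit_cons_ne c r p ps hc hps]
          simp

theorem pvSplitOn_eq (cs : List Char) : PySem.Chars.splitOn cs ['.'] = pvSplit cs := by
  have h := pvGo_spec (cs.length + 1) cs [] [] (by omega)
  have h2 : (pvSplit cs).modifyHead (List.reverse [] ++ ·) = pvSplit cs := by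
    cases hps : pvSplit cs with
    | nil => rfl
    | cons p ps => simp
  rw [h2] at h
  simpa [PySem.Chars.splitOn] using h

-- a trailing '.' puts an empty part at the end of the split
theorem pvSplit_last (cs : List Char) (h : cs.getLast? = some '.') : (pvSplit cs).getLast? = some [] := by
  induction cs with
  | nil => simp at h
  | cons c r ih =>
    cases r with
    | nil =>
      simp at h
      subst h
      simp [pvSplit]
    | cons d r' =>
      rw [List.getLast?_cons_cons] at h
      have hlast := ih h
      by_cases hc : c = '.'
      · subst hc
        rw [pvSplit_cons_dot]
        cases hps : pvSplit (d :: r') with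
        | nil => exact absurd hps (pvSplit_ne_nil _)
        | cons p ps =>
          rw [hps] at hlast
          rw [List.getLast?_cons_cons]
          exact hlast
      · cases hps : pvSplit (d :: r') with
        | nil => exact absurd hps (pvSplit_ne_nil _)
        | cons p ps =>
          rw [pvSplit_cons_ne c (d :: r') p ps hc hps]
          rw [hps] at hlast
          cases ps with
          | nil =>
            simp at hlast
            subst hlast
            exact absurd hps (pvSplit_cons_ne_single_nil d r')
          | cons q qs =>
            rw [List.getLast?_cons_cons] at hlast ⊢
            exact hlast

-- a '..' infix puts an empty part after the first part of the split
theorem pvSplit_dotdot (cs : List Char) (h : ['.', '.'] <:+: cs) : [] ∈ (pvSplit cs).tail := by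
  induction cs with
  | nil => simp at h
  | cons c r ih =>
    rcases List.infix_cons_iff.mp h with hpre | hinf
    · obtain ⟨hc, hpre'⟩ := List.cons_prefix_cons.mp hpre
      subst hc
      obtain ⟨r'', hr⟩ : ∃ r'', r = '.' :: r'' := by
        cases r with
        | nil => simp at hpre'
        | cons e r3 =>
          obtain ⟨he, -⟩ := List.cons_prefix_cons.mp hpre'
          exact ⟨r3, by rw [he]⟩
      subst hr
      rw [pvSplit_cons_dot, pvSplit_cons_dot]
      simp
    · have hm := ih hinf
      by_cases hc : c = '.'
      · subst hc
        rw [pvSplit_cons_dot]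
        simpa using List.mem_of_mem_tail hm
      · cases hps : pvSplit r with
        | nil => exact absurd hps (pvSplit_ne_nil r)
        | cons p ps =>
          rw [pvSplit_cons_ne c r p ps hc hps]
          rw [hps] at hm
          simpa using hm

-- A's validator agrees with B's split-shape guard
theorem pvPartA_iff (p : List Char) :
    (if (!PySem.Chars.strIsdigit p) = true then false
     else !(decide ((PySem.Int.ofChars? p).getD 0 < 0) || decide (9999 < (PySem.Int.ofChars? p).getD 0))) = true
    ↔ (PySem.Chars.strIsdigit p = true ∧ 0 ≤ (PySem.Int.ofChars? p).getD 0 ∧ (PySem.Int.ofChars? p).getD 0 ≤ 9999) := by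
  cases hd : PySem.Chars.strIsdigit p with
  | false => simp
  | true => simp

theorem pvPartB_false_iff (p : List Char) :
    (!PySem.Chars.strIsdigit p ||
      !(decide (0 ≤ (PySem.Int.ofChars? p).getD 0) && decide ((PySem.Int.ofChars? p).getD 0 ≤ 9999))) = false
    ↔ (PySem.Chars.strIsdigit p = true ∧ 0 ≤ (PySem.Int.ofChars? p).getD 0 ∧ (PySem.Int.ofChars? p).getD 0 ≤ 9999) := by
  cases hd : PySem.Chars.strIsdigit p with
  | false => simp
  | true => simp

theorem pvBadB_false_iff (parts : List (List Char)) :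
    pvBadB parts = false ↔ (parts.length = 4 ∧ ∀ p ∈ parts,
      PySem.Chars.strIsdigit p = true ∧ 0 ≤ (PySem.Int.ofChars? p).getD 0 ∧ (PySem.Int.ofChars? p).getD 0 ≤ 9999) := by
  unfold pvBadB
  rw [Bool.or_eq_false_iff, decide_eq_false_iff_not, Decidable.not_not, List.any_eq_false]
  constructor
  · rintro ⟨h4, hall⟩
    exact ⟨h4, fun p hp => (pvPartB_false_iff p).mp (by simpa using hall p hp)⟩
  · rintro ⟨h4, hall⟩
    exact ⟨h4, fun p hp => by simpa using (pvPartB_false_iff p).mpr (hall p hp)⟩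

theorem pvValid_eq (cs : List Char) : pvValidateA cs = !pvBadB (PySem.Chars.splitOn cs ['.']) := by
  rw [pvSplitOn_eq]
  have hiff : pvValidateA cs = true ↔ pvBadB (pvSplit cs) = false := by
    rw [pvBadB_false_iff]
    constructor
    · intro h
      unfold pvValidateA at h
      rw [pvSplitOn_eq] at h
      split_ifs at h with h1 h2
      simp at h
      exact h
    · rintro ⟨hlen, hparts⟩
      have hnil : [] ∉ pvSplit cs := by
        intro hmem
        have := (hparts [] hmem).1
        simp [PySem.Chars.strIsdigit] at this
      obtain ⟨c, r, hcs⟩ : ∃ c r, cs = c :: r := by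
        cases cs with
        | nil => simp [pvSplit] at hlen
        | cons c r => exact ⟨c, r, rfl⟩
      subst hcs
      have hc : c ≠ '.' := by
        intro hc
        subst hc
        exact hnil (by rw [pvSplit_cons_dot]; simp)
      have hlastc : ((PySem.List.pyGet? (c :: r) (-1)).getD ' ') ≠ '.' := by
        rw [PySem.List.pyGet?_neg_one]
        obtain ⟨d, hd⟩ := Option.isSome_iff_exists.mp (List.getLast?_isSome.mpr (List.cons_ne_nil c r))
        rw [hd]
        simp only [Option.getD_some]
        intro hdd
        subst hdd
        exact hnil (List.mem_of_getLast? (pvSplit_last _ hd))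
      have hdd : PySem.Chars.isIn ['.', '.'] (c :: r) = false := by
        rw [PySem.Chars.isIn_eq_false_iff]
        intro hinf
        exact hnil (List.mem_of_mem_tail (pvSplit_dotdot _ hinf))
      unfold pvValidateA
      rw [pvSplitOn_eq]
      rw [if_neg (by simp [hc, hlastc]), if_neg (by simp [hdd])]
      simp only
      rw [if_neg (by simp [hlen])]
      rw [List.all_eq_true]
      intro p hp
      exact (pvPartA_iff p).mpr (hparts p hp)
  cases hA : pvValidateA cs with
  | true => rw [hiff.mp hA]; rfl
  | false =>
    cases hB : pvBadB (pvSplit cs) with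
    | true => rfl
    | false => exact absurd (hiff.mpr hB) (by rw [hA]; simp)

-- A's running-pointer loop produces, position by position, closed-form paired indices
theorem pvLoop_eq (L : List Char) (j2 j3 : Int) :
    ∀ (m : Nat) (p : Int) (acc : List Char),
    ((List.range m).foldl
        (fun (st : List Char × Int) (_ : Nat) =>
          ((st.1 ++ [pvIdx L st.2]) ++ [pvIdx L (st.2 + j2)], st.2 + j2 - j3)) (acc, p))
      = (acc ++ (List.range m).flatMap
          (fun (k : Nat) => [pvIdx L (p + (k : Int) * (j2 - j3)), pvIdx L (p + j2 + (k : Int) * (j2 - j3))]),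
         p + (m : Int) * (j2 - j3)) := by
  intro m
  induction m with
  | zero => intro p acc; simp
  | succ m ih =>
    intro p acc
    rw [List.range_succ, List.foldl_append, ih]
    simp only [List.foldl_cons, List.foldl_nil, List.flatMap_append, List.flatMap_cons,
      List.flatMap_nil, List.append_nil, List.append_assoc, Prod.mk.injEq,
      List.cons_append, List.nil_append, pvIdx, pvIdx]
    constructor
    · have h1 : p + j2 + (m : Int) * (j2 - j3) = p + (m : Int) * (j2 - j3) + j2 := by ring
      rw [h1]
    · push_cast; ring

-- a flatMap emitting pairs is a map over twice the range, split by parity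
theorem pvPairFlat (M : Nat) (F G : Nat → Char) :
    (List.range M).flatMap (fun k => [F k, G k])
      = (List.range (2 * M)).map (fun j => if j % 2 = 0 then F (j / 2) else G (j / 2)) := by
  induction M with
  | zero => simp
  | succ M ih =>
    rw [List.range_succ, List.flatMap_append, ih,
      show 2 * (M + 1) = (2 * M + 1) + 1 by ring, List.range_succ, List.range_succ]
    simp only [List.map_append, List.flatMap_cons, List.flatMap_nil, List.append_nil,
      List.map_cons, List.map_nil, List.append_assoc]
    congr 1
    have e1 : (2 * M) % 2 = 0 := by omega
    have e2 : (2 * M) / 2 = M := by omega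
    have e3 : (2 * M + 1) % 2 = 1 := by omega
    have e4 : (2 * M + 1) / 2 = M := by omega
    simp [e1, e2, e3, e4]

-- the emission halves of the two ports agree
theorem pvEmit_eq (L : List Char) (j2 j3 p nd : Int) :
    PySem.List.slice
      (((PySem.List.pyRange 0 (PySem.Int.floordiv nd 2) 1).foldl
        (fun (st : List Char × Int) _ =>
          ((st.1 ++ [pvIdx L st.2]) ++ [pvIdx L (st.2 + j2)], st.2 + j2 - j3)) ([], p)).1)
      none (some nd)
    = (PySem.List.pyRange 0 (2 * PySem.Int.floordiv nd 2) 1).map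
        (fun k => pvIdx L (p + PySem.Int.floordiv k 2 * (j2 - j3) + PySem.Int.mod k 2 * j2)) := by
  have hm2 : (2 * PySem.Int.floordiv nd 2).toNat = 2 * (PySem.Int.floordiv nd 2).toNat := by
    omega
  rw [PySem.List.pyRange_one, PySem.List.pyRange_one]
  simp only [Int.sub_zero, List.foldl_map, List.map_map, hm2]
  rw [pvLoop_eq]
  simp only [List.nil_append]
  rw [pvPairFlat ((PySem.Int.floordiv nd 2).toNat)
    (fun k => pvIdx L (p + (k : Int) * (j2 - j3)))
    (fun k => pvIdx L (p + j2 + (k : Int) * (j2 - j3)))]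
  have hbody : ((fun k : Int => pvIdx L (p + PySem.Int.floordiv k 2 * (j2 - j3) + PySem.Int.mod k 2 * j2))
        ∘ (fun k : Nat => (0 : Int) + (k : Int)))
      = (fun j : Nat => if j % 2 = 0 then pvIdx L (p + ((j / 2 : Nat) : Int) * (j2 - j3))
          else pvIdx L (p + j2 + ((j / 2 : Nat) : Int) * (j2 - j3))) := by
    funext j
    have e1 : PySem.Int.floordiv (j : Int) 2 = ((j / 2 : Nat) : Int) := by
      rw [PySem.Int.floordiv_eq_ediv_of_pos (by omega)]
      omega
    have e2 : PySem.Int.mod (j : Int) 2 = ((j % 2 : Nat) : Int) := by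
      rw [PySem.Int.mod_eq_emod_of_pos (by omega)]
      omega
    simp only [Function.comp_apply, Int.zero_add, e1, e2]
    rcases Nat.mod_two_eq_zero_or_one j with hj | hj
    · rw [if_pos hj, hj]
      congr 1
      push_cast
      ring
    · rw [if_neg (by omega), hj]
      congr 1
      push_cast
      ring
  rw [hbody]
  -- remove the slice: the produced list is never longer than nd
  by_cases hnd : 0 ≤ nd
  · rw [PySem.List.slice_to _ hnd]
    apply List.take_of_length_le
    rw [List.length_map, List.length_range]
    have := PySem.Int.floordiv_eq_ediv_of_pos (a := nd) (b := 2) (by omega)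
    omega
  · have hz : (PySem.Int.floordiv nd 2).toNat = 0 := by
      have := PySem.Int.floordiv_eq_ediv_of_pos (a := nd) (b := 2) (by omega)
      omega
    rw [hz]
    simp [PySem.List.slice]

-- ===== VERDICT (by name: the statement is the Claim_ definition above) =====
theorem str_pi_4dig3_spec : Claim_equal_str_pi_4dig3 := by
  intro key lp nd bl _ _
  simp only [Spec_str_pi_4dig3, str_pi_4dig3, str_pi_4dig3_alt]
  rw [pvValid_eq]
  cases hb : pvBadB (PySem.Chars.splitOn key.toList ['.']) with
  | true => simp
  | false =>
    simp only [Bool.not_false, Bool.not_true, Bool.false_eq_true, if_false]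
    rw [pvEmit_eq]
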